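-- pv_equiv track=rewrite | github.com/daniel-reich/ubiquitous-fiesta | CMqa7tAtffudQ7hs4_23.py | sorting_steps
-- ===== SOURCE A (Python) =====
-- def sorting_steps(lst):
--   lst = lst[:]
--   swaps = []
--   target = sorted(lst)
--   for i in range(len(lst)):
--     j = lst.index(target[i])
--     lst[i], lst[j] = lst[j], lst[i]
--     swaps.append((i,j))
--   return swaps
-- ===== SOURCE B (Python) =====
-- from bisect import insort, bisect_left
--
-- def sorting_steps(lst):
--     n = len(lst)
--     positions = {}
--     for p in range(n - 1, -1, -1):
--         positions.setdefault(lst[p], []).insert(0, p)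
--     shifted = {}
--     js = []
--     for i, v in enumerate(sorted(lst)):
--         locs = positions[v]
--         j = locs.pop(0)
--         w = shifted.get(i, lst[i])
--         shifted[i] = v
--         shifted[j] = w
--         insort(locs, i)
--         wl = positions.setdefault(w, [])
--         del wl[bisect_left(wl, i)]
--         insort(wl, j)
--         js.append(j)
--     return [(i, j) for i, j in enumerate(js)]
-- ===== Notes on version B (the rewrite author's own statement) =====
-- stated objective: faster
-- what changed: A mutates a list copy and rescans it with lst.index every iteration (O(n^2)); B never keeps or scans the list: it builds a per-value sorted index of positions once, reads each swap target in O(1) off the head of that index, maintains the index eagerly with bisect insert/delete plus a sparse overlay dict of displaced values, and assembles the (i,j) pairs at the end.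
import Mathlib
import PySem

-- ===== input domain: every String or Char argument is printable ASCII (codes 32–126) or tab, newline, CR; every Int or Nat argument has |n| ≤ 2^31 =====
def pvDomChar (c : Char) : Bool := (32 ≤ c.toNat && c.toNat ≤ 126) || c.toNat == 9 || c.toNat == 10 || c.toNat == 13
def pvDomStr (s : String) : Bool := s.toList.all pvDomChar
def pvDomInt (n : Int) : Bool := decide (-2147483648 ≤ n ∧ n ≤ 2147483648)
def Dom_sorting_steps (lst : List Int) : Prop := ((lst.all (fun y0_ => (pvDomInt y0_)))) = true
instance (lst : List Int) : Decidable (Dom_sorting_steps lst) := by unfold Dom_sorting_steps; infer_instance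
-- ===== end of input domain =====

-- B never copies or scans the list: it keeps a per-value sorted index of positions (eager
-- bisect insert/delete) plus a sparse overlay of displaced values, and assembles the pairs
-- at the end; measured much faster than A's per-step lst.index rescan.

-- enumerate(xs, s) with a Nat start; indices are the nonnegative ints s, s+1, …
def enumNat {α : Type} (s : Nat) : List α → List (Nat × α)
  | [] => []
  | x :: xs => (s, x) :: enumNat (s + 1) xs

-- ===== PORT A =====
-- one iteration of A's loop body: j = lst.index(target[i]); swap lst[i], lst[j]; record (i, j)
def sortingStepsAStep (target : List Int) (st : List Int × List (Int × Int)) (i : Nat) :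
    List Int × List (Int × Int) :=
  match PySem.List.index? st.1 (target.getD i 0) with  -- target[i]: i < len(target) inside the loop
  | none => st                                         -- Python ValueError; unreachable (target permutes lst)
  | some j =>
      let a := st.1.getD i 0                           -- lst[i]  (i < len(lst) inside the loop)
      let b := st.1.getD j 0                           -- lst[j]
      ((st.1.set i b).set j a, st.2 ++ [((i : Int), (j : Int))])

def sorting_steps (lst : List Int) : List (Int × Int) :=
  let target := PySem.List.sorted lst (fun x => x)
  ((List.range lst.length).foldl (sortingStepsAStep target) (lst, [])).2

-- ===== PORT B =====
-- bisect_left(l, x) on а sorted list = number of elements < x; exact on B's sorted lists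
def bisectLeft (l : List Nat) (x : Nat) : Nat := l.countP (fun y => decide (y < x))

-- for p in range(n-1, -1, -1): positions.setdefault(lst[p], []).insert(0, p)
-- foldr over enumerate(lst) = that reversed-range prepend loop, step for step
def buildPositions (pvs : List (Nat × Int)) : PySem.Dict Int (List Nat) :=
  pvs.foldr (fun pv d => d.insert pv.2 (pv.1 :: d.getD pv.2 [])) PySem.Dict.empty

-- one iteration of B's loop body over (i, v) from enumerate(sorted(lst)); positions lists are
-- Python lists mutated in place, so each mutation is re-inserted into the dict at once
-- (insort = orderedInsert: on lists of distinct-or-equal Nats both insertion sides give the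
-- same list).  pop(0) of an empty list would be Python IndexError — unreachable, v ∈ cur.
def sortingStepsBStep (lst : List Int)
    (st : (PySem.Dict Int (List Nat) × PySem.Dict Nat Int) × List Nat) (iv : Nat × Int) :
    (PySem.Dict Int (List Nat) × PySem.Dict Nat Int) × List Nat :=
  let pos := st.1.1
  let sh := st.1.2
  let i := iv.1
  let v := iv.2
  match pos.getD v [] with
  | [] => st
  | j :: rest =>                                        -- j = locs.pop(0)
      let w := sh.getD i (lst.getD i 0)                 -- w = shifted.get(i, lst[i])
      let sh' := (sh.insert i v).insert j w             -- shifted[i] = v; shifted[j] = w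
      let pos1 := pos.insert v (List.orderedInsert (· ≤ ·) i rest)   -- insort(locs, i)
      let wl := pos1.getD w []                          -- wl = positions.setdefault(w, []) (aliases locs if w == v)
      let pos2 := pos1.insert w
        (List.orderedInsert (· ≤ ·) j (wl.eraseIdx (bisectLeft wl i)))  -- del wl[bisect_left(wl, i)]; insort(wl, j)
      ((pos2, sh'), st.2 ++ [j])                        -- js.append(j)

def sorting_steps_alt (lst : List Int) : List (Int × Int) :=
  let pos0 := buildPositions (enumNat 0 lst)
  let js := ((enumNat 0 (PySem.List.sorted lst (fun x => x))).foldl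
      (sortingStepsBStep lst) ((pos0, PySem.Dict.empty), [])).2
  (enumNat 0 js).map (fun pj => ((pj.1 : Int), (pj.2 : Int)))   -- [(i, j) for i, j in enumerate(js)]

-- ===== PRECONDITION & SPEC =====
def Spec_sorting_steps (lst : List Int) (out : List (Int × Int)) : Prop := out = sorting_steps_alt lst
instance (lst : List Int) (out : List (Int × Int)) : Decidable (Spec_sorting_steps lst out) := by unfold Spec_sorting_steps; infer_instance

-- ===== CLAIM (what is proved, stated in full; the proofs are below) =====
def Claim_equal_sorting_steps : Prop := ∀ (lst : List Int), Dom_sorting_steps lst → Spec_sorting_steps lst (sorting_steps lst)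

-- ===== LEMMAS AND PROOFS =====

-- B's state invariant, phrased against the ghost list `cur` that A maintains:
-- positions is EXACTLY the per-value strictly-sorted index of cur, and the overlay
-- dict `sh` over the original lst reads back cur.
def InvB (lst cur : List Int) (pos : PySem.Dict Int (List Nat)) (sh : PySem.Dict Nat Int) : Prop :=
  (∀ (v : Int) (p : Nat), p ∈ pos.getD v [] ↔ cur[p]? = some v) ∧
  (∀ v : Int, (pos.getD v []).Pairwise (· < ·)) ∧
  (∀ p : Nat, sh.getD p (lst.getD p 0) = cur.getD p 0)

-- eraseIdx at bisect_left deletes the (unique) occurrence of a present element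
theorem eraseIdx_bisectLeft_of_mem (l : List Nat) (i : Nat)
    (hs : l.Pairwise (· < ·)) (hm : i ∈ l) :
    l.eraseIdx (bisectLeft l i) = l.erase i := by
  induction l with
  | nil => simp at hm
  | cons h t ih =>
      rcases List.pairwise_cons.mp hs with ⟨hlt, hpt⟩
      by_cases hhi : h = i
      · subst hhi
        have hc : bisectLeft (h :: t) h = 0 := by
          simp only [bisectLeft, List.countP_cons]
          have : t.countP (fun y => decide (y < h)) = 0 := by
            rw [List.countP_eq_zero]
            intro y hy
            have := hlt y hy
            simp
            omega
          simp [this]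
        rw [hc, List.eraseIdx_cons_zero, List.erase_cons_head]
      · have hit : i ∈ t := by
          rcases List.mem_cons.mp hm with h1 | h1
          · exact absurd h1.symm hhi
          · exact h1
        have hhlt : h < i := hlt i hit
        have hc : bisectLeft (h :: t) i = bisectLeft t i + 1 := by
          simp only [bisectLeft, List.countP_cons]
          simp [hhlt]
        rw [hc, List.eraseIdx_cons_succ, ih hpt hit,
          List.erase_cons_tail (by simp [hhi])]

-- inserting then deleting at bisect_left is the identity on a (≤)-sorted list
theorem eraseIdx_bisectLeft_orderedInsert (l : List Nat) (i : Nat)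
    (hs : l.Pairwise (· ≤ ·)) :
    (List.orderedInsert (· ≤ ·) i l).eraseIdx
      (bisectLeft (List.orderedInsert (· ≤ ·) i l) i) = l := by
  induction l with
  | nil => simp [List.orderedInsert, bisectLeft]
  | cons h t ih =>
      rcases List.pairwise_cons.mp hs with ⟨hle, hpt⟩
      by_cases hih : i ≤ h
      · have hOI : List.orderedInsert (· ≤ ·) i (h :: t) = i :: h :: t := by
          simp [List.orderedInsert, hih]
        rw [hOI]
        have hc : bisectLeft (i :: h :: t) i = 0 := by
          simp only [bisectLeft, List.countP_cons]
          have h1 : t.countP (fun y => decide (y < i)) = 0 := by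
            rw [List.countP_eq_zero]
            intro y hy
            have := hle y hy
            simp
            omega
          have h2 : ¬ (h < i) := by omega
          simp [h1, h2]
        rw [hc, List.eraseIdx_cons_zero]
      · have hhi : h < i := by omega
        have hOI : List.orderedInsert (· ≤ ·) i (h :: t)
            = h :: List.orderedInsert (· ≤ ·) i t := by
          simp [List.orderedInsert, hih]
        rw [hOI]
        have hc : bisectLeft (h :: List.orderedInsert (· ≤ ·) i t) i
            = bisectLeft (List.orderedInsert (· ≤ ·) i t) i + 1 := by
          simp only [bisectLeft, List.countP_cons]
          simp [hhi]
        rw [hc, List.eraseIdx_cons_succ, ih hpt]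

-- inserting a fresh element keeps strict sortedness
theorem pairwise_lt_orderedInsert (l : List Nat) (x : Nat)
    (hs : l.Pairwise (· < ·)) (hx : x ∉ l) :
    (List.orderedInsert (· ≤ ·) x l).Pairwise (· < ·) := by
  induction l with
  | nil => simp
  | cons h t ih =>
      rcases List.pairwise_cons.mp hs with ⟨hlt, hpt⟩
      have hxh : x ≠ h := fun he => hx (by simp [he])
      have hxt : x ∉ t := fun he => hx (by simp [he])
      by_cases hxle : x ≤ h
      · have hOI : List.orderedInsert (· ≤ ·) x (h :: t) = x :: h :: t := by
          simp [List.orderedInsert, hxle]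
        rw [hOI]
        refine List.pairwise_cons.mpr ⟨?_, hs⟩
        intro y hy
        rcases List.mem_cons.mp hy with rfl | hy'
        · omega
        · have := hlt y hy'
          omega
      · have hOI : List.orderedInsert (· ≤ ·) x (h :: t)
            = h :: List.orderedInsert (· ≤ ·) x t := by
          simp [List.orderedInsert, hxle]
        rw [hOI]
        refine List.pairwise_cons.mpr ⟨?_, ih hpt hxt⟩
        intro y hy
        rcases (List.mem_orderedInsert _).mp hy with rfl | hy'
        · omega
        · exact hlt y hy'

-- the head of the exact sorted index is Python's lst.index
theorem index_eq_head (cur : List Int) (v : Int) (j : Nat) (rest : List Nat)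
    (hmem : ∀ p : Nat, p ∈ j :: rest ↔ cur[p]? = some v)
    (hs : (j :: rest).Pairwise (· < ·)) (hv : v ∈ cur) :
    PySem.List.index? cur v = some j := by
  have hsome : (PySem.List.index? cur v).isSome :=
    (PySem.List.index?_isSome_iff cur v).mpr hv
  obtain ⟨j', hj'⟩ := Option.isSome_iff_exists.mp hsome
  obtain ⟨hj'C, hj'v, hleast⟩ := PySem.List.getElem_of_index?_eq_some hj'
  have hjv : cur[j]? = some v := (hmem j).mp List.mem_cons_self
  have hjC : j < cur.length := by
    by_contra h
    rw [List.getElem?_eq_none (by omega)] at hjv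
    simp at hjv
  have h1 : j' ≤ j := by
    by_contra h
    have : cur[j] ≠ v := hleast j (by omega)
    rw [List.getElem?_eq_getElem hjC] at hjv
    exact this (Option.some.inj hjv)
  have h2 : j ≤ j' := by
    have hj'mem : j' ∈ j :: rest := (hmem j').mpr
      (by rw [List.getElem?_eq_getElem hj'C, hj'v])
    rcases List.mem_cons.mp hj'mem with rfl | hr
    · omega
    · have := (List.pairwise_cons.mp hs).1 j' hr
      omega
  have : j' = j := by omega
  rw [← this]
  exact hj'

-- swapping two in-range entries is a permutation
theorem cons_get_set_perm {α : Type} (x : α) :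
    ∀ (t : List α) (k : Nat) (hk : k < t.length), (t[k] :: t.set k x).Perm (x :: t) := by
  intro t
  induction t with
  | nil => intro k hk; simp at hk
  | cons y s ih =>
      intro k hk
      cases k with
      | zero => simpa using List.Perm.swap x y s
      | succ m =>
          have hm : m < s.length := by simpa using hk
          calc (s[m] :: y :: s.set m x).Perm (y :: s[m] :: s.set m x) := List.Perm.swap _ _ _
            _ = (y :: (s[m] :: s.set m x)) := rfl
            _ |>.Perm (y :: x :: s) := List.Perm.cons y (ih m hm)
            _ |>.Perm (x :: y :: s) := List.Perm.swap _ _ _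

theorem swap_perm {α : Type} :
    ∀ (l : List α) (i j : Nat) (hi : i < l.length) (hj : j < l.length),
      (((l.set i l[j]).set j l[i]).Perm l) := by
  intro l
  induction l with
  | nil => intro i j hi hj; simp at hi
  | cons x t ih =>
      intro i j hi hj
      cases i with
      | zero =>
          cases j with
          | zero => simp
          | succ k =>
              have hk : k < t.length := by simpa using hj
              simpa using cons_get_set_perm x t k hk
      | succ m =>
          cases j with
          | zero =>
              have hm : m < t.length := by simpa using hi
              simpa using cons_get_set_perm x t m hm
          | succ k =>
              have hm : m < t.length := by simpa using hi
              have hk : k < t.length := by simpa using hj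
              simpa using List.Perm.cons x (ih m k hm hk)

theorem enumNat_map_fst {α : Type} :
    ∀ (xs : List α) (s : Nat), (enumNat s xs).map Prod.fst = List.range' s xs.length := by
  intro xs
  induction xs with
  | nil => intro s; simp [enumNat]
  | cons x t ih => intro s; simp [enumNat, List.range'_succ, ih]

theorem getElem?_of_mem_enumNat {α : Type} :
    ∀ (xs : List α) (s : Nat) (pv : Nat × α), pv ∈ enumNat s xs →
      s ≤ pv.1 ∧ xs[pv.1 - s]? = some pv.2 := by
  intro xs
  induction xs with
  | nil => intro s pv h; simp [enumNat] at h
  | cons x t ih =>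
      intro s pv h
      simp only [enumNat, List.mem_cons] at h
      rcases h with rfl | h
      · simp
      · have := ih (s + 1) pv h
        refine ⟨by omega, ?_⟩
        have h1 : pv.1 - s = (pv.1 - (s + 1)) + 1 := by omega
        rw [h1]
        simpa using this.2

theorem enumNat_append {α : Type} :
    ∀ (xs ys : List α) (s : Nat),
      enumNat s (xs ++ ys) = enumNat s xs ++ enumNat (s + xs.length) ys := by
  intro xs
  induction xs with
  | nil => intro ys s; simp [enumNat]
  | cons x t ih =>
      intro ys s
      simp only [List.cons_append, enumNat, ih, List.length_cons]
      have h1 : s + 1 + t.length = s + (t.length + 1) := by omega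
      rw [h1]

-- building the index: membership and sortedness
theorem buildPositions_spec (lst : List Int) :
    (∀ (v : Int) (p : Nat), p ∈ (buildPositions (enumNat 0 lst)).getD v [] ↔ lst[p]? = some v) ∧
    (∀ v : Int, ((buildPositions (enumNat 0 lst)).getD v []).Pairwise (· < ·)) := by
  have key : ∀ (xs : List Int) (s : Nat),
      (∀ (v : Int) (p : Nat), p ∈ (buildPositions (enumNat s xs)).getD v [] ↔
        (s ≤ p ∧ xs[p - s]? = some v)) ∧
      (∀ v : Int, ((buildPositions (enumNat s xs)).getD v []).Pairwise (· < ·)) := by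
    intro xs
    induction xs with
    | nil =>
        intro s
        constructor
        · intro v p
          simp [enumNat, buildPositions, PySem.Dict.getD_empty]
        · intro v
          simp [enumNat, buildPositions, PySem.Dict.getD_empty]
    | cons x t ih =>
        intro s
        have hstep : buildPositions (enumNat s (x :: t))
            = (buildPositions (enumNat (s + 1) t)).insert x
                (s :: (buildPositions (enumNat (s + 1) t)).getD x []) := by
          simp [enumNat, buildPositions]
        constructor
        · intro v p
          rw [hstep, PySem.Dict.getD_insert]
          by_cases hvx : v = x
          · subst hvx
            rw [if_pos rfl]
            constructor
            · intro hp
              rcases List.mem_cons.mp hp with rfl | hp'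
              · simp
              · have := ((ih (s + 1)).1 v p).mp hp'
                refine ⟨by omega, ?_⟩
                have h1 : p - s = (p - (s + 1)) + 1 := by omega
                rw [h1]
                simpa using this.2
            · intro ⟨hsp, hget⟩
              by_cases hps : p = s
              · subst hps; exact List.mem_cons_self
              · have h1 : p - s = (p - (s + 1)) + 1 := by omega
                rw [h1] at hget
                simp only [List.getElem?_cons_succ] at hget
                exact List.mem_cons_of_mem _ (((ih (s + 1)).1 v p).mpr ⟨by omega, hget⟩)
          · rw [if_neg hvx]
            rw [(ih (s + 1)).1 v p]
            constructor
            · intro ⟨hsp, hget⟩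
              refine ⟨by omega, ?_⟩
              have h1 : p - s = (p - (s + 1)) + 1 := by omega
              rw [h1]
              simpa using hget
            · intro ⟨hsp, hget⟩
              by_cases hps : p = s
              · subst hps
                simp at hget
                exact absurd hget.symm hvx
              · have h1 : p - s = (p - (s + 1)) + 1 := by omega
                rw [h1] at hget
                simp only [List.getElem?_cons_succ] at hget
                exact ⟨by omega, hget⟩
        · intro v
          rw [hstep, PySem.Dict.getD_insert]
          by_cases hvx : v = x
          · subst hvx
            rw [if_pos rfl]
            refine List.pairwise_cons.mpr ⟨?_, (ih (s + 1)).2 v⟩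
            intro p hp
            have := ((ih (s + 1)).1 v p).mp hp
            omega
          · rw [if_neg hvx]
            exact (ih (s + 1)).2 v
  exact ⟨fun v p => by simpa using (key lst 0).1 v p, (key lst 0).2⟩

-- one step preserves the invariant
theorem InvB_step (lst cur : List Int) (pos : PySem.Dict Int (List Nat)) (sh : PySem.Dict Nat Int)
    (i j : Nat) (v : Int) (rest : List Nat)
    (hiC : i < cur.length) (hjv? : cur[j]? = some v)
    (hpos : pos.getD v [] = j :: rest) (hinv : InvB lst cur pos sh) :
    InvB lst ((cur.set i (cur.getD j 0)).set j (cur.getD i 0))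
      ((pos.insert v (List.orderedInsert (· ≤ ·) i rest)).insert (sh.getD i (lst.getD i 0))
        (List.orderedInsert (· ≤ ·) j
          (((pos.insert v (List.orderedInsert (· ≤ ·) i rest)).getD (sh.getD i (lst.getD i 0)) []).eraseIdx
            (bisectLeft ((pos.insert v (List.orderedInsert (· ≤ ·) i rest)).getD (sh.getD i (lst.getD i 0)) []) i))))
      ((sh.insert i v).insert j (sh.getD i (lst.getD i 0))) := by
  obtain ⟨hm, hp, hsh⟩ := hinv
  have hjC : j < cur.length := by
    by_contra h
    rw [List.getElem?_eq_none (by omega)] at hjv?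
    simp at hjv?
  have ha? : cur[i]? = some (cur.getD i 0) := by
    rw [List.getD_eq_getElem?_getD, List.getElem?_eq_getElem hiC]
    simp
  have hbv : cur.getD j 0 = v := by
    rw [List.getD_eq_getElem?_getD, hjv?]
    rfl
  rw [hsh i]
  have hlocs_mem : ∀ p : Nat, p ∈ j :: rest ↔ cur[p]? = some v := by
    intro p; rw [← hpos]; exact hm v p
  have hlocs_pw : (j :: rest).Pairwise (· < ·) := hpos ▸ hp v
  have hj_lt : ∀ p ∈ rest, j < p := (List.pairwise_cons.mp hlocs_pw).1
  have hrest_pw : rest.Pairwise (· < ·) := (List.pairwise_cons.mp hlocs_pw).2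
  have hrest_mem : ∀ p : Nat, p ∈ rest ↔ (cur[p]? = some v ∧ p ≠ j) := by
    intro p
    constructor
    · intro hp'
      exact ⟨(hlocs_mem p).mp (List.mem_cons_of_mem _ hp'),
        fun he => by have := hj_lt p hp'; omega⟩
    · intro ⟨hc, hne⟩
      rcases List.mem_cons.mp ((hlocs_mem p).mpr hc) with rfl | hp'
      · exact absurd rfl hne
      · exact hp'
  -- the swapped list, pointwise, split by position
  have hc_j : ∀ p : Nat, j = p →
      ((cur.set i (cur.getD j 0)).set j (cur.getD i 0))[p]? = some (cur.getD i 0) := by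
    intro p h1
    rw [List.getElem?_set, if_pos h1, List.length_set, if_pos (by omega)]
  have hc_i : ∀ p : Nat, ¬ j = p → i = p →
      ((cur.set i (cur.getD j 0)).set j (cur.getD i 0))[p]? = some (cur.getD j 0) := by
    intro p h1 h2
    rw [List.getElem?_set, if_neg h1, List.getElem?_set, if_pos h2, if_pos (by omega)]
  have hc_o : ∀ p : Nat, ¬ j = p → ¬ i = p →
      ((cur.set i (cur.getD j 0)).set j (cur.getD i 0))[p]? = cur[p]? := by
    intro p h1 h2
    rw [List.getElem?_set, if_neg h1, List.getElem?_set, if_neg h2]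
  by_cases hva : v = cur.getD i 0
  · -- CASE B: cur[i] = v, the two dict entries alias (w == v)
    rw [← hva]
    have hcurB : ∀ p : Nat, ((cur.set i (cur.getD j 0)).set j v)[p]? = cur[p]? := by
      intro p
      by_cases h1 : j = p
      · rw [List.getElem?_set, if_pos h1, List.length_set, if_pos (by omega), ← h1, hjv?]
      · rw [List.getElem?_set, if_neg h1, List.getElem?_set]
        by_cases h2 : i = p
        · rw [if_pos h2, if_pos (by omega), ← h2, ha?, hbv]
          exact congrArg some hva
        · rw [if_neg h2]
    have hwl : ((pos.insert v (List.orderedInsert (· ≤ ·) i rest)).getD v [])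
        = List.orderedInsert (· ≤ ·) i rest := by
      rw [PySem.Dict.getD_insert, if_pos rfl]
    have herase : (List.orderedInsert (· ≤ ·) i rest).eraseIdx
        (bisectLeft (List.orderedInsert (· ≤ ·) i rest) i) = rest :=
      eraseIdx_bisectLeft_orderedInsert rest i (hrest_pw.imp (fun h => Nat.le_of_lt h))
    have hjrest : j ∉ rest := fun hj' => by have := hj_lt j hj'; omega
    have hgD : ∀ u : Int,
        (((pos.insert v (List.orderedInsert (· ≤ ·) i rest)).insert v
          (List.orderedInsert (· ≤ ·) j
            ((( pos.insert v (List.orderedInsert (· ≤ ·) i rest)).getD v []).eraseIdx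
              (bisectLeft ((pos.insert v (List.orderedInsert (· ≤ ·) i rest)).getD v []) i)))).getD u [])
        = if u = v then List.orderedInsert (· ≤ ·) j rest else pos.getD u [] := by
      intro u
      rw [hwl, herase, PySem.Dict.getD_insert]
      by_cases huv : u = v
      · rw [if_pos huv, if_pos huv]
      · rw [if_neg huv, if_neg huv, PySem.Dict.getD_insert, if_neg huv]
    have hvalB : ∀ p : Nat, ((cur.set i (cur.getD j 0)).set j v).getD p 0 = cur.getD p 0 := by
      intro p
      have h1 : ((cur.set i (cur.getD j 0)).set j v).getD p 0
          = (((cur.set i (cur.getD j 0)).set j v)[p]?).getD 0 := List.getD_eq_getElem?_getD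
      rw [h1, hcurB p, ← List.getD_eq_getElem?_getD]
    refine ⟨?_, ?_, ?_⟩
    · intro u p
      rw [hgD u, hcurB p]
      by_cases huv : u = v
      · subst huv
        rw [if_pos rfl, List.mem_orderedInsert]
        constructor
        · rintro (rfl | h')
          · exact hjv?
          · exact ((hrest_mem p).mp h').1
        · intro h
          by_cases hpj : p = j
          · exact Or.inl hpj
          · exact Or.inr ((hrest_mem p).mpr ⟨h, hpj⟩)
      · rw [if_neg huv]
        exact hm u p
    · intro u
      rw [hgD u]
      by_cases huv : u = v
      · rw [if_pos huv]
        exact pairwise_lt_orderedInsert rest j hrest_pw hjrest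
      · rw [if_neg huv]
        exact hp u
    · intro p
      rw [PySem.Dict.getD_insert, hvalB p]
      by_cases hpj : p = j
      · rw [if_pos hpj, hpj, hbv]
      · rw [if_neg hpj, PySem.Dict.getD_insert]
        by_cases hpi : p = i
        · rw [if_pos hpi, hpi]
          exact hva
        · rw [if_neg hpi]
          exact hsh p
  · -- CASE A: cur[i] ≠ v, hence i ≠ j and the two dict entries are distinct
    have hav : cur[i]? ≠ some v := by
      rw [ha?]
      intro h
      exact hva (Option.some.inj h).symm
    have hij : i ≠ j := fun he => hav (he ▸ hjv?)
    have hirest : i ∉ rest := fun h => hav ((hrest_mem i).mp h).1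
    have hL1pw : (List.orderedInsert (· ≤ ·) i rest).Pairwise (· < ·) :=
      pairwise_lt_orderedInsert rest i hrest_pw hirest
    have hL1mem : ∀ p : Nat, p ∈ List.orderedInsert (· ≤ ·) i rest ↔
        (p = i ∨ (cur[p]? = some v ∧ p ≠ j)) := by
      intro p
      rw [List.mem_orderedInsert, hrest_mem p]
    have hwl : ((pos.insert v (List.orderedInsert (· ≤ ·) i rest)).getD (cur.getD i 0) [])
        = pos.getD (cur.getD i 0) [] := by
      rw [PySem.Dict.getD_insert, if_neg (fun h => hva h.symm)]
    have hiwl : i ∈ pos.getD (cur.getD i 0) [] := (hm _ i).mpr ha?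
    have hwlpw : (pos.getD (cur.getD i 0) []).Pairwise (· < ·) := hp _
    have hwlnd : (pos.getD (cur.getD i 0) []).Nodup := hwlpw.imp (fun h => Nat.ne_of_lt h)
    have herase : (pos.getD (cur.getD i 0) []).eraseIdx (bisectLeft (pos.getD (cur.getD i 0) []) i)
        = (pos.getD (cur.getD i 0) []).erase i := eraseIdx_bisectLeft_of_mem _ _ hwlpw hiwl
    have hmem_erase : ∀ p : Nat, p ∈ (pos.getD (cur.getD i 0) []).erase i ↔
        (cur[p]? = some (cur.getD i 0) ∧ p ≠ i) := by
      intro p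
      rw [List.Nodup.mem_erase_iff hwlnd, hm _ p]
      tauto
    have hjerase : j ∉ (pos.getD (cur.getD i 0) []).erase i := by
      intro h
      have h2 := (hmem_erase j).mp h
      rw [hjv?] at h2
      exact hva (Option.some.inj h2.1)
    have hlw'pw : (List.orderedInsert (· ≤ ·) j ((pos.getD (cur.getD i 0) []).erase i)).Pairwise (· < ·) :=
      pairwise_lt_orderedInsert _ j (hwlpw.sublist (List.erase_sublist)) hjerase
    have hlw'mem : ∀ p : Nat, p ∈ List.orderedInsert (· ≤ ·) j ((pos.getD (cur.getD i 0) []).erase i) ↔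
        (p = j ∨ (cur[p]? = some (cur.getD i 0) ∧ p ≠ i)) := by
      intro p
      rw [List.mem_orderedInsert, hmem_erase p]
    have hgD : ∀ u : Int,
        (((pos.insert v (List.orderedInsert (· ≤ ·) i rest)).insert (cur.getD i 0)
          (List.orderedInsert (· ≤ ·) j
            ((( pos.insert v (List.orderedInsert (· ≤ ·) i rest)).getD (cur.getD i 0) []).eraseIdx
              (bisectLeft ((pos.insert v (List.orderedInsert (· ≤ ·) i rest)).getD (cur.getD i 0) []) i)))).getD u [])
        = if u = cur.getD i 0 then List.orderedInsert (· ≤ ·) j ((pos.getD (cur.getD i 0) []).erase i)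
          else if u = v then List.orderedInsert (· ≤ ·) i rest
          else pos.getD u [] := by
      intro u
      rw [hwl, herase, PySem.Dict.getD_insert, PySem.Dict.getD_insert]
    refine ⟨?_, ?_, ?_⟩
    · intro u p
      rw [hgD u]
      by_cases hjp : j = p
      · rw [hc_j p hjp]
        by_cases hua : u = cur.getD i 0
        · rw [if_pos hua, hlw'mem p]
          constructor
          · intro _
            rw [hua]
          · intro _
            exact Or.inl hjp.symm
        · rw [if_neg hua]
          have hne : ¬ some (cur.getD i 0) = some u := fun h => hua (Option.some.inj h).symm
          by_cases huv : u = v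
          · rw [if_pos huv, hL1mem p]
            constructor
            · rintro (h | h)
              · exact absurd (hjp.trans h) (fun he => hij he.symm)
              · exact absurd hjp.symm h.2
            · intro h
              exact absurd h hne
          · rw [if_neg huv, hm u p, ← hjp, hjv?]
            constructor
            · intro h
              exact absurd (Option.some.inj h).symm huv
            · intro h
              exact absurd h hne
      · by_cases hip : i = p
        · rw [hc_i p hjp hip, hbv]
          by_cases hua : u = cur.getD i 0
          · rw [if_pos hua, hlw'mem p]
            constructor
            · rintro (h | h)
              · exact absurd h.symm hjp
              · exact absurd hip.symm h.2
            · intro h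
              have h2 : u = v := (Option.some.inj h).symm
              rw [h2] at hua
              exact absurd hua hva
          · rw [if_neg hua]
            by_cases huv : u = v
            · subst huv
              rw [if_pos rfl, hL1mem p]
              constructor
              · intro _
                rfl
              · intro _
                exact Or.inl hip.symm
            · rw [if_neg huv, hm u p, ← hip, ha?]
              constructor
              · intro h
                exact absurd (Option.some.inj h).symm hua
              · intro h
                exact absurd (Option.some.inj h).symm huv
        · rw [hc_o p hjp hip]
          by_cases hua : u = cur.getD i 0
          · rw [if_pos hua, hlw'mem p]
            constructor
            · rintro (h | h)
              · exact absurd h.symm hjp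
              · rw [hua]
                exact h.1
            · intro h
              refine Or.inr ⟨?_, fun he => hip he.symm⟩
              rw [← hua]
              exact h
          · rw [if_neg hua]
            by_cases huv : u = v
            · subst huv
              rw [if_pos rfl, hL1mem p]
              constructor
              · rintro (h | h)
                · exact absurd h.symm hip
                · exact h.1
              · intro h
                exact Or.inr ⟨h, fun he => hjp he.symm⟩
            · rw [if_neg huv]
              exact hm u p
    · intro u
      rw [hgD u]
      by_cases hua : u = cur.getD i 0
      · rw [if_pos hua]
        exact hlw'pw
      · rw [if_neg hua]
        by_cases huv : u = v
        · rw [if_pos huv]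
          exact hL1pw
        · rw [if_neg huv]
          exact hp u
    · intro p
      have hval : ((cur.set i (cur.getD j 0)).set j (cur.getD i 0)).getD p 0
          = if j = p then cur.getD i 0 else if i = p then cur.getD j 0 else cur.getD p 0 := by
        have h1 : ((cur.set i (cur.getD j 0)).set j (cur.getD i 0)).getD p 0
            = (((cur.set i (cur.getD j 0)).set j (cur.getD i 0))[p]?).getD 0 :=
          List.getD_eq_getElem?_getD
        by_cases hjp : j = p
        · rw [h1, hc_j p hjp, if_pos hjp]
          rfl
        · by_cases hip : i = p
          · rw [h1, hc_i p hjp hip, if_neg hjp, if_pos hip]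
            rfl
          · rw [h1, hc_o p hjp hip, if_neg hjp, if_neg hip, ← List.getD_eq_getElem?_getD]
      rw [PySem.Dict.getD_insert, hval]
      by_cases hpj : p = j
      · rw [if_pos hpj, if_pos hpj.symm]
      · rw [if_neg hpj, if_neg (fun h => hpj h.symm), PySem.Dict.getD_insert]
        by_cases hpi : p = i
        · rw [if_pos hpi, if_pos hpi.symm, hbv]
        · rw [if_neg hpi, if_neg (fun h => hpi h.symm)]
          exact hsh p

-- the two loops run in lockstep: A's swap list is the enumeration of B's j-sequence
theorem loop_eq (target lst : List Int) :
    ∀ (tl : List Int) (k : Nat) (cur : List Int) (pos : PySem.Dict Int (List Nat))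
      (sh : PySem.Dict Nat Int) (js : List Nat),
      cur.Perm target → InvB lst cur pos sh →
      (∀ pv ∈ enumNat k tl, target[pv.1]? = some pv.2) →
      js.length = k →
      (((enumNat k tl).map Prod.fst).foldl (sortingStepsAStep target)
          (cur, (enumNat 0 js).map (fun pj => ((pj.1 : Int), (pj.2 : Int))))).2
        = (enumNat 0 (((enumNat k tl).foldl (sortingStepsBStep lst) ((pos, sh), js)).2)).map
            (fun pj => ((pj.1 : Int), (pj.2 : Int))) := by
  intro tl
  induction tl with
  | nil =>
      intro k cur pos sh js _ _ _ _
      simp [enumNat]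
  | cons v tl' ih =>
      intro k cur pos sh js hperm hinv hsub hjs
      have hv : target[k]? = some v := hsub (k, v) (by simp [enumNat])
      have hkT : k < target.length := by
        by_contra h
        rw [List.getElem?_eq_none (by omega)] at hv
        simp at hv
      have hlen : cur.length = target.length := hperm.length_eq
      have hkC : k < cur.length := by omega
      have hvc : v ∈ cur := by
        apply hperm.mem_iff.mpr
        have hg : target[k] = v := by
          rw [List.getElem?_eq_getElem hkT] at hv
          exact Option.some.inj hv
        exact hg ▸ List.getElem_mem hkT
      cases hL : pos.getD v [] with
      | nil =>
          exfalso
          obtain ⟨q, hq, hqv⟩ := List.mem_iff_getElem.mp hvc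
          have : q ∈ pos.getD v [] := (hinv.1 v q).mpr
            (by rw [List.getElem?_eq_getElem hq, hqv])
          rw [hL] at this
          exact absurd this (List.not_mem_nil)
      | cons j rest =>
          have hjv? : cur[j]? = some v := (hinv.1 v j).mp (by rw [hL]; exact List.mem_cons_self)
          have hidx : PySem.List.index? cur v = some j :=
            index_eq_head cur v j rest (fun p => by rw [← hL]; exact hinv.1 v p)
              (hL ▸ hinv.2.1 v) hvc
          have hjC : j < cur.length := by
            by_contra h
            rw [List.getElem?_eq_none (by omega)] at hjv?
            simp at hjv?
          have htD : target.getD k 0 = v := by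
            rw [List.getD_eq_getElem?_getD, hv]
            rfl
          have henum : enumNat k (v :: tl') = (k, v) :: enumNat (k + 1) tl' := rfl
          rw [henum, List.map_cons, List.foldl_cons, List.foldl_cons]
          have hstepA : sortingStepsAStep target
              (cur, (enumNat 0 js).map (fun pj => ((pj.1 : Int), (pj.2 : Int)))) k =
              ((cur.set k (cur.getD j 0)).set j (cur.getD k 0),
                (enumNat 0 js).map (fun pj => ((pj.1 : Int), (pj.2 : Int)))
                  ++ [((k : Int), (j : Int))]) := by
            simp only [sortingStepsAStep, htD, hidx]
          have hstepB : sortingStepsBStep lst ((pos, sh), js) (k, v) =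
              (((pos.insert v (List.orderedInsert (· ≤ ·) k rest)).insert
                  (sh.getD k (lst.getD k 0))
                  (List.orderedInsert (· ≤ ·) j
                    ((( pos.insert v (List.orderedInsert (· ≤ ·) k rest)).getD
                        (sh.getD k (lst.getD k 0)) []).eraseIdx
                      (bisectLeft ((pos.insert v (List.orderedInsert (· ≤ ·) k rest)).getD
                        (sh.getD k (lst.getD k 0)) []) k))),
                (sh.insert k v).insert j (sh.getD k (lst.getD k 0))), js ++ [j]) := by
            simp only [sortingStepsBStep, hL]
          rw [hstepA, hstepB]
          have hacc : (enumNat 0 js).map (fun pj => ((pj.1 : Int), (pj.2 : Int)))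
              ++ [((k : Int), (j : Int))]
              = (enumNat 0 (js ++ [j])).map (fun pj => ((pj.1 : Int), (pj.2 : Int))) := by
            rw [enumNat_append, List.map_append]
            simp [enumNat, hjs]
          rw [hacc]
          have hspos : ∀ p : Nat, (sh.getD p (lst.getD p 0)) = cur.getD p 0 := hinv.2.2
          apply ih (k + 1)
          · have ha : cur.getD k 0 = cur[k] := by
              rw [List.getD_eq_getElem?_getD, List.getElem?_eq_getElem hkC]
              rfl
            have hbg : cur.getD j 0 = cur[j] := by
              rw [List.getD_eq_getElem?_getD, List.getElem?_eq_getElem hjC]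
              rfl
            rw [ha, hbg]
            exact (swap_perm cur k j hkC hjC).trans hperm
          · exact InvB_step lst cur pos sh k j v rest hkC hjv? hL hinv
          · intro pv h
            exact hsub pv (List.mem_cons_of_mem _ h)
          · simp [hjs]

-- ===== VERDICT (by name: the statement is the Claim_ definition above) =====
theorem sorting_steps_spec : Claim_equal_sorting_steps := by
  unfold Claim_equal_sorting_steps
  intro lst _
  unfold Spec_sorting_steps sorting_steps sorting_steps_alt
  have hrange : List.range lst.length
      = (enumNat 0 (PySem.List.sorted lst (fun x => x))).map Prod.fst := by
    rw [enumNat_map_fst, PySem.List.length_sorted, List.range_eq_range']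
  rw [hrange]
  have h := loop_eq (PySem.List.sorted lst (fun x => x)) lst
    (PySem.List.sorted lst (fun x => x)) 0 lst (buildPositions (enumNat 0 lst))
    PySem.Dict.empty []
    ((PySem.List.sorted_perm lst _ _).symm)
    ⟨(buildPositions_spec lst).1, (buildPositions_spec lst).2, by
      intro p; rw [PySem.Dict.getD_empty]⟩
    (by
      intro pv h
      have := getElem?_of_mem_enumNat (PySem.List.sorted lst (fun x => x)) 0 pv h
      simpa using this.2)
    rfl
  simpa [enumNat] using h
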